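-- pv_equiv track=rewrite | github.com/justlovett0/OCC-Configurator | Source Code/configurator/configuratorsrc/screen_app.py | _brightness_from_hw
-- ===== SOURCE A (Python) =====
-- def _brightness_from_hw(hw_val):
--     hw_val = max(0, min(31, int(hw_val)))
--     table = [0, 1, 2, 3, 5, 7, 11, 16, 23, 31]
--     best = 0
--     for i, v in enumerate(table):
--         if abs(v - hw_val) <= abs(table[best] - hw_val):
--             best = i
--     return best
-- ===== SOURCE B (Python) =====
-- def _brightness_from_hw(hw_val):
--     hw = max(0, min(31, int(hw_val)))
--     table = [0, 1, 2, 3, 5, 7, 11, 16, 23, 31]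
--
--     def bisect_left(lo, hi):
--         if lo >= hi:
--             return lo
--         mid = (lo + hi) // 2
--         if table[mid] < hw:
--             return bisect_left(mid + 1, hi)
--         return bisect_left(lo, mid)
--
--     pos = bisect_left(0, len(table))
--     if pos == 0:
--         return 0
--     if pos == len(table):
--         return len(table) - 1
--     if hw - table[pos - 1] < table[pos] - hw:
--         return pos - 1
--     return pos
-- ===== Notes on version B (the rewrite author's own statement) =====
-- stated objective: alternative
-- what changed: Replaces A's full linear scan over the table (tracking the last index of minimal distance) with a hand-written bisect_left binary search followed by a two-neighbour comparison, breaking exact ties toward the higher index.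
import Mathlib
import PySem

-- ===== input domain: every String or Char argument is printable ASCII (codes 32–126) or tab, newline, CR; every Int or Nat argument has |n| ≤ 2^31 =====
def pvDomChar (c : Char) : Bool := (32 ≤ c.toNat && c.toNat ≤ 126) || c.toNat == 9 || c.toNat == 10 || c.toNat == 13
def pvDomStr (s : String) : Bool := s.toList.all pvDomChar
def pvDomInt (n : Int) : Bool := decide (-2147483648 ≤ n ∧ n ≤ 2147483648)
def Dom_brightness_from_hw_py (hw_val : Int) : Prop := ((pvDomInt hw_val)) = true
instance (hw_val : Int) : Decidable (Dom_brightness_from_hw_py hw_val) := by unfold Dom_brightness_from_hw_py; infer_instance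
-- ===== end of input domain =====

-- B replaces A's linear scan of the brightness table with a recursive bisect_left plus a two-neighbour nearest comparison (tie toward the higher index); alternative algorithm, same return value.

set_option maxRecDepth 8000


-- ===== PORT A =====
def brightness_from_hw_py (hw_val : Int) : Int :=
  let hw := max 0 (min 31 hw_val)
  let table : List Int := [0, 1, 2, 3, 5, 7, 11, 16, 23, 31]
  -- for i, v in enumerate(table): if abs(v - hw) <= abs(table[best] - hw): best = i
  -- table[best] is always in range (best starts 0 and is set to enumerate indices), so getD 0 is never taken
  (PySem.List.enumerate table).foldl
    (fun best iv =>
      if |iv.2 - hw| ≤ |((PySem.List.pyGet? table best).getD 0) - hw| then iv.1 else best)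
    0

-- ===== PORT B =====
-- recursive bisect_left from Source B; the fuel argument only bounds the recursion depth
-- (hi - lo shrinks every call, so fuel = table.length always suffices)
def pvBisect (table : List Int) (hw : Int) : Nat → Nat → Nat → Nat
  | 0, lo, _ => lo
  | fuel + 1, lo, hi =>
    if lo ≥ hi then lo
    else
      let mid := (lo + hi) / 2
      if ((PySem.List.pyGet? table (mid : Int)).getD 0) < hw then
        pvBisect table hw fuel (mid + 1) hi
      else
        pvBisect table hw fuel lo mid

def brightness_from_hw_py_alt (hw_val : Int) : Int :=
  let hw := max 0 (min 31 hw_val)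
  let table : List Int := [0, 1, 2, 3, 5, 7, 11, 16, 23, 31]
  let pos := pvBisect table hw table.length 0 table.length
  if pos = 0 then 0
  else if pos = table.length then (table.length : Int) - 1
  else if hw - ((PySem.List.pyGet? table ((pos : Int) - 1)).getD 0)
            < ((PySem.List.pyGet? table (pos : Int)).getD 0) - hw then (pos : Int) - 1
  else (pos : Int)

-- ===== PRECONDITION & SPEC =====
def Spec_brightness_from_hw_py (hw_val : Int) (out : Int) : Prop := out = brightness_from_hw_py_alt hw_val
instance (hw_val : Int) (out : Int) : Decidable (Spec_brightness_from_hw_py hw_val out) := by unfold Spec_brightness_from_hw_py; infer_instance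

-- ===== CLAIM (what is proved, stated in full; the proofs are below) =====
def Claim_equal_brightness_from_hw_py : Prop := ∀ (hw_val : Int), Dom_brightness_from_hw_py hw_val → Spec_brightness_from_hw_py hw_val (brightness_from_hw_py hw_val)

-- ===== LEMMAS AND PROOFS =====

lemma pvClampA (hw : Int) :
    brightness_from_hw_py hw = brightness_from_hw_py (max 0 (min 31 hw)) := by
  simp only [brightness_from_hw_py]
  have h : max 0 (min 31 (max 0 (min 31 hw))) = max 0 (min 31 hw) := by omega
  rw [h]

lemma pvClampB (hw : Int) :
    brightness_from_hw_py_alt hw = brightness_from_hw_py_alt (max 0 (min 31 hw)) := by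
  simp only [brightness_from_hw_py_alt]
  have h : max 0 (min 31 (max 0 (min 31 hw))) = max 0 (min 31 hw) := by omega
  rw [h]

-- ===== VERDICT (by name: the statement is the Claim_ definition above) =====
theorem brightness_from_hw_py_spec : Claim_equal_brightness_from_hw_py := by
  intro hw _
  unfold Spec_brightness_from_hw_py
  rw [pvClampA, pvClampB]
  set c := max 0 (min 31 hw) with hc
  have h0 : 0 ≤ c := by omega
  have h1 : c ≤ 31 := by omega
  clear_value c
  interval_cases c <;> decide
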